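-- pv_equiv track=rewrite | github.com/ithung-str/sd-workbench | backend/app/vensim/importer.py | _split_top_level_sum_terms
-- ===== SOURCE A (Python) =====
-- def _split_top_level_sum_terms(expr: str) -> list[tuple[int, str]]:
--     terms: list[tuple[int, str]] = []
--     depth = 0
--     sign = 1
--     cur: list[str] = []
--     for ch in expr:
--         if ch in "+-" and depth == 0:
--             token = "".join(cur).strip()
--             if token:
--                 terms.append((sign, token))
--             sign = 1 if ch == "+" else -1
--             cur = []
--             continue
--         if ch == "(":
--             depth += 1
--         elif ch == ")":
--             depth = max(0, depth - 1)
--         cur.append(ch)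
--     token = "".join(cur).strip()
--     if token:
--         terms.append((sign, token))
--     return terms
-- ===== SOURCE B (Python) =====
-- def _split_top_level_sum_terms(expr: str) -> list[tuple[int, str]]:
--     # Pass 1: indices of every top-level '+'/'-'.
--     bounds = []
--     depth = 0
--     for i, ch in enumerate(expr):
--         if depth == 0 and ch in "+-":
--             bounds.append(i)
--         elif ch == "(":
--             depth += 1
--         elif ch == ")":
--             depth = max(0, depth - 1)
--     # Pass 2: slice between consecutive boundaries; each non-empty stripped
--     # slice takes the sign of the operator immediately preceding it.
--     terms = []
--     prev = 0
--     sign = 1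
--     for b in bounds + [len(expr)]:
--         token = expr[prev:b].strip()
--         if token:
--             terms.append((sign, token))
--         if b < len(expr):
--             sign = 1 if expr[b] == "+" else -1
--         prev = b + 1
--     return terms
-- ===== Notes on version B (the rewrite author's own statement) =====
-- stated objective: alternative
-- what changed: Replaces A's single scan with an accumulator of pending characters and in-loop term emission by a two-pass decomposition: first collect the indices of all top-level '+'/'-' operators, then build the terms by slicing the string between consecutive boundaries, each non-empty stripped slice taking the sign of the operator right before it.
import Mathlib
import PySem

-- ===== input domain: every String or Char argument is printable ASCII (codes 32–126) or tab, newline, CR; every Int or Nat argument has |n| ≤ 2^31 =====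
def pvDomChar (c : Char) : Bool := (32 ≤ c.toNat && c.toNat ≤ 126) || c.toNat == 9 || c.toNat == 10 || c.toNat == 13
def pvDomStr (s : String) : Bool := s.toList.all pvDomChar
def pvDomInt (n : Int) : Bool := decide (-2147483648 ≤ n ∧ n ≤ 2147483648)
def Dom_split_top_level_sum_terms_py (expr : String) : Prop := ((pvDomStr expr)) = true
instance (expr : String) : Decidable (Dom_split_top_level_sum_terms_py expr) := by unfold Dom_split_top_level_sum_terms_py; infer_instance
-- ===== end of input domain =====

-- B replaces A's single accumulator-carrying scan by two passes — collect the
-- indices of the top-level '+'/'-' operators, then slice the string between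
-- consecutive boundaries — a simpler decomposition of the same O(n) work.

-- ===== PORT A =====
-- A's loop state: (terms, depth, sign, cur); strings handled as List Char
-- ("".join(cur).strip() = PySem.Chars.strip cur).
def pvALoop : List Char → List (Int × String) → Int → Int → List Char → List (Int × String)
  | [], terms, _depth, sign, cur =>
      let token := PySem.Chars.strip cur
      if token ≠ [] then terms ++ [(sign, String.ofList token)] else terms
  | ch :: rest, terms, depth, sign, cur =>
      if (ch = '+' ∨ ch = '-') ∧ depth = 0 then
        let token := PySem.Chars.strip cur
        let terms' := if token ≠ [] then terms ++ [(sign, String.ofList token)] else terms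
        pvALoop rest terms' depth (if ch = '+' then 1 else -1) []
      else
        let depth' := if ch = '(' then depth + 1
                      else if ch = ')' then max 0 (depth - 1) else depth
        pvALoop rest terms depth' sign (cur ++ [ch])

def split_top_level_sum_terms_py (expr : String) : List (Int × String) :=
  pvALoop expr.toList [] 0 1 []

-- ===== PORT B =====
-- Pass 1 of Source B: indices of the top-level '+'/'-' characters.
def pvBBounds : List Char → Int → Nat → List Nat
  | [], _, _ => []
  | ch :: rest, depth, i =>
      if depth = 0 ∧ (ch = '+' ∨ ch = '-') then i :: pvBBounds rest depth (i + 1)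
      else if ch = '(' then pvBBounds rest (depth + 1) (i + 1)
      else if ch = ')' then pvBBounds rest (max 0 (depth - 1)) (i + 1)
      else pvBBounds rest depth (i + 1)

-- Pass 2 of Source B over bounds ++ [len]; expr[prev:b] with 0 ≤ prev, b ≤ len is
-- exactly (drop prev).take (b - prev); expr[b] (guarded by b < len) is getD.
def pvBEmit (cs : List Char) : List Nat → Nat → Int → List (Int × String)
  | [], _, _ => []
  | b :: bs, prev, sign =>
      let token := PySem.Chars.strip ((cs.drop prev).take (b - prev))
      let head := if token ≠ [] then [(sign, String.ofList token)] else []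
      let sign' := if b < cs.length then (if cs.getD b ' ' = '+' then 1 else -1) else sign
      head ++ pvBEmit cs bs (b + 1) sign'

def split_top_level_sum_terms_py_alt (expr : String) : List (Int × String) :=
  pvBEmit expr.toList (pvBBounds expr.toList 0 0 ++ [expr.toList.length]) 0 1

-- ===== PRECONDITION & SPEC =====
def Spec_split_top_level_sum_terms_py (expr : String) (out : List (Int × String)) : Prop := out = split_top_level_sum_terms_py_alt expr
instance (expr : String) (out : List (Int × String)) : Decidable (Spec_split_top_level_sum_terms_py expr out) := by unfold Spec_split_top_level_sum_terms_py; infer_instance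

-- ===== CLAIM (what is proved, stated in full; the proofs are below) =====
def Claim_equal_split_top_level_sum_terms_py : Prop := ∀ (expr : String), Dom_split_top_level_sum_terms_py expr → Spec_split_top_level_sum_terms_py expr (split_top_level_sum_terms_py expr)

-- ===== LEMMAS AND PROOFS =====

-- Invariant linking the two: A's pending segment cur is exactly the slice of
-- full between the last boundary (prev) and the current position prev+|cur|.
lemma pvKey (cs : List Char) : ∀ (full : List Char) (prev : Nat) (cur : List Char)
    (depth sign : Int) (terms : List (Int × String)),
    prev + cur.length ≤ full.length →
    full.drop (prev + cur.length) = cs →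
    (full.drop prev).take cur.length = cur →
    pvALoop cs terms depth sign cur =
      terms ++ pvBEmit full (pvBBounds cs depth (prev + cur.length) ++ [full.length]) prev sign := by
  induction cs with
  | nil =>
      intro full prev cur depth sign terms hle hdrop hcur
      have hlen : prev + cur.length = full.length := by
        have := List.drop_eq_nil_iff.mp hdrop; omega
      have hdl : (full.drop prev).length = cur.length := by
        simp [List.length_drop]; omega
      have htok : (full.drop prev).take (full.length - prev) = cur := by
        have h1 : (full.drop prev).take (full.length - prev) = full.drop prev := by
          apply List.take_of_length_le; simp [List.length_drop]
        have h2 : full.drop prev = cur := by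
          rw [← hcur]; exact (List.take_of_length_le hdl.le).symm
        rw [h1, h2]
      simp only [pvBBounds, List.nil_append, pvBEmit, htok, pvALoop]
      have : ¬ full.length < full.length := lt_irrefl _
      split <;> simp [*]
  | cons ch rest ih =>
      intro full prev cur depth sign terms hle hdrop hcur
      set i := prev + cur.length with hi
      have hilt : i < full.length := by
        have := congrArg List.length hdrop
        simp [List.length_drop] at this; omega
      have hexp : full.drop i = full[i] :: full.drop (i + 1) :=
        List.drop_eq_getElem_cons hilt
      rw [hdrop] at hexp
      have hch : full[i] = ch := by injection hexp with h1 _; exact h1.symm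
      have hrest : full.drop (i + 1) = rest := by injection hexp with _ h2; exact h2.symm
      by_cases hc : (ch = '+' ∨ ch = '-') ∧ depth = 0
      · -- boundary character
        have hcb : depth = 0 ∧ (ch = '+' ∨ ch = '-') := ⟨hc.2, hc.1⟩
        rw [pvALoop, if_pos hc, pvBBounds, if_pos hcb, List.cons_append, pvBEmit]
        have htok : (full.drop prev).take (i - prev) = cur := by
          have : i - prev = cur.length := by omega
          rw [this, hcur]
        have hsign : (if i < full.length then (if full.getD i ' ' = '+' then 1 else -1) else sign)
            = (if ch = '+' then (1:Int) else -1) := by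
          rw [if_pos hilt, List.getD_eq_getElem _ _ hilt, hch]
        rw [htok, hsign]
        have hIH := ih full (i + 1) [] depth (if ch = '+' then 1 else -1)
          (if PySem.Chars.strip cur ≠ [] then terms ++ [(sign, String.ofList (PySem.Chars.strip cur))] else terms)
          (by simpa using hilt) (by simpa using hrest) (by simp)
        simp only [List.length_nil, Nat.add_zero] at hIH
        rw [hIH]
        split <;> simp
      · -- ordinary character
        have hcb : ¬ (depth = 0 ∧ (ch = '+' ∨ ch = '-')) := fun h => hc ⟨h.2, h.1⟩
        rw [pvALoop, if_neg hc]
        have hdrop' : full.drop (prev + (cur ++ [ch]).length) = rest := by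
          simpa [Nat.add_assoc] using hrest
        have hcur' : (full.drop prev).take (cur ++ [ch]).length = cur ++ [ch] := by
          have hgl : (full.drop prev)[cur.length]? = some ch := by
            rw [List.getElem?_drop]
            rw [← hi, ← hch]
            exact List.getElem?_eq_getElem hilt
          simp [List.take_add_one, hcur, hgl]
        have hle' : prev + (cur ++ [ch]).length ≤ full.length := by
          simp; omega
        have hIH := ih full prev (cur ++ [ch])
          (if ch = '(' then depth + 1 else if ch = ')' then max 0 (depth - 1) else depth)
          sign terms hle' hdrop' hcur'
        have hlen' : prev + (cur ++ [ch]).length = i + 1 := by simp [hi]; omega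
        rw [hlen'] at hIH
        rw [hIH]
        rw [pvBBounds, if_neg hcb]
        by_cases h1 : ch = '(' <;> by_cases h2 : ch = ')' <;> simp [h1, h2]

-- ===== VERDICT (by name: the statement is the Claim_ definition above) =====
theorem split_top_level_sum_terms_py_spec : Claim_equal_split_top_level_sum_terms_py := by
  intro expr _
  unfold Spec_split_top_level_sum_terms_py split_top_level_sum_terms_py split_top_level_sum_terms_py_alt
  simpa using pvKey expr.toList expr.toList 0 [] 0 1 [] (by simp) (by simp) (by simp)
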